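-- pv_equiv track=rewrite | github.com/jerryyin/scripts | iree/tuning/tuning_spec_to_mlir.py | extract_linalg_generic_block
-- ===== SOURCE A (Python) =====
-- def extract_linalg_generic_block(lines, start_index):
--     for i in range(start_index, len(lines)):
--         if 'linalg.generic' in lines[i]:
--             start = i
--             end = None
--             for j in range(start + 1, len(lines)):
--                 if '}' in lines[j] and '-> tensor<' in lines[j]:
--                     end = j
--                     break
--             if end is not None:
--                 return lines[start:end+1], end
--     return [], start_index
-- ===== SOURCE B (Python) =====
-- def extract_linalg_generic_block(lines, start_index):
--     start = None
--     for i in range(start_index, len(lines)):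
--         line = lines[i]
--         if start is None:
--             if 'linalg.generic' in line:
--                 start = i
--         elif '}' in line and '-> tensor<' in line:
--             return lines[start:i + 1], i
--     return [], start_index
-- ===== Notes on version B (the rewrite author's own statement) =====
-- stated objective: alternative
-- what changed: Replaced A's nested loops (for every candidate 'linalg.generic' line, an inner rescan for the closing line) by a single linear pass that records the first 'linalg.generic' line in a state variable and returns at the first closing line seen afterwards.
import Mathlib
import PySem

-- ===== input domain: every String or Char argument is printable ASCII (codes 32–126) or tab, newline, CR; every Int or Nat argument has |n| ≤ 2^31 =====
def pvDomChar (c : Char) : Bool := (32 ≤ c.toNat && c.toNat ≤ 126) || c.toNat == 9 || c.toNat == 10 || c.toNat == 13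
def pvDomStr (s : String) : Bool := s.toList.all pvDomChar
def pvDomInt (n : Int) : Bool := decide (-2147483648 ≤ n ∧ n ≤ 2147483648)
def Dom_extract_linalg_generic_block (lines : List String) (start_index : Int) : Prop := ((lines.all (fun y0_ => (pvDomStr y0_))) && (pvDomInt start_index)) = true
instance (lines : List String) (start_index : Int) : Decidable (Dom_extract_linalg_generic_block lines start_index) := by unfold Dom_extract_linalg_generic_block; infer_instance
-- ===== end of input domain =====

-- B replaces A's nested find-generic/find-close loops with one linear pass holding a `start` state flag; equal return value on all inputs where A returns.

-- ===== PORT A =====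
-- inner loop: 'for j in range(start+1, len(lines)): if '}' in lines[j] and '-> tensor<' in lines[j]: end = j; break'
def pvA_findEnd (lines : List String) : List Int → Option Int
  | [] => none
  | j :: rest =>
      if PySem.Str.isIn "}" (PySem.List.pyGetD lines j "") &&
         PySem.Str.isIn "-> tensor<" (PySem.List.pyGetD lines j "") then some j
      else pvA_findEnd lines rest

-- outer loop over range(start_index, len(lines))
def pvA_outer (lines : List String) (start_index : Int) : List Int → List String × Int
  | [] => ([], start_index)
  | i :: rest =>
      if PySem.Str.isIn "linalg.generic" (PySem.List.pyGetD lines i "") then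
        match pvA_findEnd lines (PySem.List.pyRange (i + 1) lines.length 1) with
        | some j => (PySem.List.slice lines (some i) (some (j + 1)), j)
        | none => pvA_outer lines start_index rest
      else pvA_outer lines start_index rest

def extract_linalg_generic_block (lines : List String) (start_index : Int) : List String × Int :=
  pvA_outer lines start_index (PySem.List.pyRange start_index lines.length 1)

-- ===== PORT B =====
-- single pass with state `start : Option Int` over range(start_index, len(lines))
def pvB_go (lines : List String) (start_index : Int) (start : Option Int) : List Int → List String × Int
  | [] => ([], start_index)
  | i :: rest =>
      let line := PySem.List.pyGetD lines i ""
      match start with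
      | none =>
          if PySem.Str.isIn "linalg.generic" line then
            pvB_go lines start_index (some i) rest
          else
            pvB_go lines start_index none rest
      | some s =>
          if PySem.Str.isIn "}" line && PySem.Str.isIn "-> tensor<" line then
            (PySem.List.slice lines (some s) (some (i + 1)), i)
          else
            pvB_go lines start_index (some s) rest

def extract_linalg_generic_block_alt (lines : List String) (start_index : Int) : List String × Int :=
  pvB_go lines start_index none (PySem.List.pyRange start_index lines.length 1)

-- ===== PRECONDITION & SPEC =====
-- A (and B) raise IndexError exactly when start_index < -len(lines): lines[start_index] then wraps out of range.
def Pre_extract_linalg_generic_block (lines : List String) (start_index : Int) : Prop :=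
  -(lines.length : Int) ≤ start_index
instance (lines : List String) (start_index : Int) : Decidable (Pre_extract_linalg_generic_block lines start_index) := by unfold Pre_extract_linalg_generic_block; infer_instance

def pvWitness_extract_linalg_generic_block : List String × Int :=
  (["x = linalg.generic {", "} -> tensor<4xf32>"], 0)

def Spec_extract_linalg_generic_block (lines : List String) (start_index : Int) (out : List String × Int) : Prop := out = extract_linalg_generic_block_alt lines start_index
instance (lines : List String) (start_index : Int) (out : List String × Int) : Decidable (Spec_extract_linalg_generic_block lines start_index out) := by unfold Spec_extract_linalg_generic_block; infer_instance

-- ===== CLAIM (what is proved, stated in full; the proofs are below) =====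
def Claim_equal_extract_linalg_generic_block : Prop := ∀ (lines : List String) (start_index : Int), Dom_extract_linalg_generic_block lines start_index → Pre_extract_linalg_generic_block lines start_index → Spec_extract_linalg_generic_block lines start_index (extract_linalg_generic_block lines start_index)

-- ===== LEMMAS AND PROOFS =====

-- "line j closes the block" / "line i contains linalg.generic"
def pvClose (lines : List String) (j : Int) : Bool :=
  PySem.Str.isIn "}" (PySem.List.pyGetD lines j "") &&
  PySem.Str.isIn "-> tensor<" (PySem.List.pyGetD lines j "")

def pvGen (lines : List String) (i : Int) : Bool :=
  PySem.Str.isIn "linalg.generic" (PySem.List.pyGetD lines i "")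

theorem pvA_findEnd_cons (lines : List String) (j : Int) (rest : List Int) :
    pvA_findEnd lines (j :: rest) =
      if pvClose lines j then some j else pvA_findEnd lines rest := rfl

theorem pvA_outer_cons (lines : List String) (si i : Int) (rest : List Int) :
    pvA_outer lines si (i :: rest) =
      if pvGen lines i then
        match pvA_findEnd lines (PySem.List.pyRange (i + 1) lines.length 1) with
        | some j => (PySem.List.slice lines (some i) (some (j + 1)), j)
        | none => pvA_outer lines si rest
      else pvA_outer lines si rest := rfl

theorem pvB_go_cons_none (lines : List String) (si i : Int) (rest : List Int) :
    pvB_go lines si none (i :: rest) =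
      if pvGen lines i then pvB_go lines si (some i) rest
      else pvB_go lines si none rest := rfl

theorem pvB_go_cons_some (lines : List String) (si s i : Int) (rest : List Int) :
    pvB_go lines si (some s) (i :: rest) =
      if pvClose lines i then (PySem.List.slice lines (some s) (some (i + 1)), i)
      else pvB_go lines si (some s) rest := rfl

theorem pvA_findEnd_none_iff (lines : List String) (js : List Int) :
    pvA_findEnd lines js = none ↔ ∀ j ∈ js, pvClose lines j = false := by
  induction js with
  | nil => simp [pvA_findEnd]
  | cons j rest ih =>
      rw [pvA_findEnd_cons]
      by_cases h : pvClose lines j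
      · simp [h]
      · simp only [Bool.not_eq_true] at h
        rw [if_neg (by simp [h])]
        simp only [List.mem_cons, ih]
        constructor
        · rintro hall x (rfl | hx)
          · exact h
          · exact hall x hx
        · intro hall x hx
          exact hall x (Or.inr hx)

theorem pvB_go_some_of_findEnd_some (lines : List String) (si s j : Int) (js : List Int)
    (h : pvA_findEnd lines js = some j) :
    pvB_go lines si (some s) js = (PySem.List.slice lines (some s) (some (j + 1)), j) := by
  induction js with
  | nil => simp [pvA_findEnd] at h
  | cons x rest ih =>
      rw [pvA_findEnd_cons] at h
      rw [pvB_go_cons_some]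
      by_cases hc : pvClose lines x
      · rw [if_pos hc] at h
        cases h
        rw [if_pos hc]
      · rw [if_neg hc] at h ⊢
        exact ih h

theorem pvB_go_some_of_noClose (lines : List String) (si s : Int) (js : List Int)
    (h : ∀ j ∈ js, pvClose lines j = false) :
    pvB_go lines si (some s) js = ([], si) := by
  induction js with
  | nil => rfl
  | cons x rest ih =>
      rw [pvB_go_cons_some, if_neg (by simp [h x List.mem_cons_self])]
      exact ih (fun j hj => h j (List.mem_cons_of_mem _ hj))

theorem pvA_outer_noClose (lines : List String) (si : Int) :
    ∀ (k : Nat) (a : Int), ((lines.length : Int) - a).toNat = k →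
    (∀ j, a ≤ j → j < (lines.length : Int) → pvClose lines j = false) →
    pvA_outer lines si (PySem.List.pyRange a lines.length 1) = ([], si) := by
  intro k
  induction k with
  | zero =>
      intro a hk _
      have : PySem.List.pyRange a lines.length 1 = [] := by
        rw [PySem.List.pyRange_one]
        simp [Int.toNat_of_nonpos (by omega : (lines.length : Int) - a ≤ 0)]
      rw [this]; rfl
  | succ k ih =>
      intro a hk hall
      have ha : a < (lines.length : Int) := by omega
      rw [PySem.List.pyRange_one_cons ha, pvA_outer_cons]
      have hinner : pvA_findEnd lines (PySem.List.pyRange (a + 1) lines.length 1) = none := by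
        apply (pvA_findEnd_none_iff _ _).mpr
        intro j hj
        have := (PySem.List.mem_pyRange_one).mp hj
        exact hall j (by omega) this.2
      have hrec : pvA_outer lines si (PySem.List.pyRange (a + 1) lines.length 1) = ([], si) :=
        ih (a + 1) (by omega) (fun j h1 h2 => hall j (by omega) h2)
      split_ifs with hg
      · rw [hinner]; exact hrec
      · exact hrec

theorem pv_main (lines : List String) (si : Int) :
    ∀ (k : Nat) (a : Int), ((lines.length : Int) - a).toNat = k →
    pvA_outer lines si (PySem.List.pyRange a lines.length 1) =
      pvB_go lines si none (PySem.List.pyRange a lines.length 1) := by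
  intro k
  induction k with
  | zero =>
      intro a hk
      have : PySem.List.pyRange a lines.length 1 = [] := by
        rw [PySem.List.pyRange_one]
        simp [Int.toNat_of_nonpos (by omega : (lines.length : Int) - a ≤ 0)]
      rw [this]; rfl
  | succ k ih =>
      intro a hk
      have ha : a < (lines.length : Int) := by omega
      rw [PySem.List.pyRange_one_cons ha, pvA_outer_cons, pvB_go_cons_none]
      split_ifs with hg
      · cases hfe : pvA_findEnd lines (PySem.List.pyRange (a + 1) lines.length 1) with
        | some j =>
            rw [pvB_go_some_of_findEnd_some lines si a j _ hfe]
        | none =>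
            have hnone := (pvA_findEnd_none_iff _ _).mp hfe
            rw [pvB_go_some_of_noClose lines si a _ hnone]
            show pvA_outer lines si (PySem.List.pyRange (a + 1) lines.length 1) = ([], si)
            apply pvA_outer_noClose lines si (((lines.length : Int) - (a + 1)).toNat) (a + 1) rfl
            intro j h1 h2
            exact hnone j ((PySem.List.mem_pyRange_one).mpr (And.intro h1 h2))
      · exact ih (a + 1) (by omega)

-- ===== VERDICT (by name: the statement is the Claim_ definition above) =====
theorem extract_linalg_generic_block_spec : Claim_equal_extract_linalg_generic_block := by
  intro lines start_index _ _
  unfold Spec_extract_linalg_generic_block extract_linalg_generic_block extract_linalg_generic_block_alt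
  exact pv_main lines start_index _ start_index rfl
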